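-- pv_equiv track=rewrite | github.com/CiscoDevNet/ansible-dcnm | fix_all_lint.py | fix_colon_spacing
-- ===== SOURCE A (Python) =====
-- def fix_colon_spacing(content: str) -> str:
--     """Fix yaml[colons] violations - exactly one space after colon."""
--     lines = content.split('\n')
--     fixed_lines = []
--
--     for line in lines:
--         # Find colons not in strings
--         if ':' in line and not line.strip().startswith('#'):
--             # Replace multiple spaces after colon with single space
--             # But preserve indentation before the key
--             parts = line.split(':', 1)
--             if len(parts) == 2:
--                 key_part = parts[0]
--                 value_part = parts[1]
--                 # Remove leading spaces from value part and add exactly one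
--                 value_part = ' ' + value_part.lstrip() if value_part.strip() else value_part
--                 line = key_part + ':' + value_part
--
--         fixed_lines.append(line)
--
--     return '\n'.join(fixed_lines)
-- ===== SOURCE B (Python) =====
-- def fix_colon_spacing(content: str) -> str:
--     """One-pass character state machine: normalize to one space after the first colon
--     of each non-comment line with a non-blank value."""
--     out = []
--     state = 0  # 0: line start/only whitespace seen; 1: in key (non-comment); 2: comment line
--                # 3: just after first colon, buffering whitespace; 4: after normalized value start
--     buf = []   # whitespace buffered in state 3 (flushed verbatim if the value turns out blank)
--     for ch in content:
--         if ch == '\n':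
--             if state == 3:
--                 out.extend(buf)
--                 buf = []
--             out.append(ch)
--             state = 0
--         elif state in (0, 1):
--             if state == 0 and ch == '#':
--                 state = 2
--                 out.append(ch)
--             elif ch == ':':
--                 state = 3
--                 out.append(ch)
--             else:
--                 if not ch.isspace():
--                     state = 1
--                 out.append(ch)
--         elif state in (2, 4):
--             out.append(ch)
--         else:  # state == 3
--             if ch.isspace():
--                 buf.append(ch)
--             else:
--                 out.append(' ')
--                 out.append(ch)
--                 buf = []
--                 state = 4
--     if state == 3:
--         out.extend(buf)
--     return ''.join(out)
-- ===== Notes on version B (the rewrite author's own statement) =====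
-- stated objective: alternative
-- what changed: A's three passes (split into lines, per-line split at the first colon with strip/lstrip, join) are replaced by a single character-level state machine over the whole string that buffers post-colon whitespace and flushes it verbatim when a line's value turns out blank.
import Mathlib
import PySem

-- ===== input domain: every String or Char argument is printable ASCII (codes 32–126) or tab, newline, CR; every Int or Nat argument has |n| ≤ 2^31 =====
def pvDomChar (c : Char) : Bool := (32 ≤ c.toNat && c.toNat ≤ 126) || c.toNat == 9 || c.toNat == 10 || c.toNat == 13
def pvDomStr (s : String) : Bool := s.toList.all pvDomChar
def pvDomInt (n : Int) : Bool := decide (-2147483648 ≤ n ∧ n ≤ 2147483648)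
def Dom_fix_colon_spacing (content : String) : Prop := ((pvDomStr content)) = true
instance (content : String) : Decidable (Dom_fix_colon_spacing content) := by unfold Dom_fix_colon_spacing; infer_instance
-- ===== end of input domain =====

-- B replaces A's split/per-line-split/join passes by a single character-level state machine over the whole string; objective: alternative.

-- ===== PORT A =====
-- loop body of A, applied to the code points of one line
def pvFixLineA (line : List Char) : List Char :=
  if PySem.Chars.isIn [':'] line && !(PySem.Chars.startswith (PySem.Chars.strip line) ['#']) then
    let parts := PySem.Chars.splitOnMax line [':'] 1
    if parts.length = 2 then
      let key_part := parts[0]!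
      let value_part := parts[1]!
      let value_part :=
        if PySem.Chars.strip value_part ≠ [] then ' ' :: PySem.Chars.lstrip value_part
        else value_part
      key_part ++ [':'] ++ value_part
    else line
  else line


def fix_colon_spacing (content : String) : String :=
  let lines := PySem.Chars.splitOn content.toList ['\n']   -- content.split('\n')
  let fixed_lines := lines.foldl (fun acc line => acc ++ [pvFixLineA line]) ([] : List (List Char))
  String.mk (PySem.Chars.join ['\n'] fixed_lines)          -- '\n'.join(fixed_lines)

-- ===== PORT B =====
-- one step of B's state machine; the machine state is (out, state, buf) exactly as in Source B
def pvStep (s : List Char × Nat × List Char) (ch : Char) : List Char × Nat × List Char :=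
  match s with
  | (out, st, buf) =>
    if ch = '\n' then
      if st = 3 then (out ++ buf ++ ['\n'], 0, [])
      else (out ++ ['\n'], 0, buf)
    else if st = 0 ∨ st = 1 then
      if st = 0 ∧ ch = '#' then (out ++ [ch], 2, buf)
      else if ch = ':' then (out ++ [ch], 3, buf)
      else (out ++ [ch], if PySem.Chars.isspace ch then st else 1, buf)
    else if st = 2 ∨ st = 4 then (out ++ [ch], st, buf)
    else
      if PySem.Chars.isspace ch then (out, st, buf ++ [ch])
      else (out ++ [' ', ch], 4, [])


def fix_colon_spacing_alt (content : String) : String :=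
  let r := content.toList.foldl pvStep ([], 0, [])
  String.mk (if r.2.1 = 3 then r.1 ++ r.2.2 else r.1)      -- trailing 'if state == 3: out.extend(buf)'

-- ===== PRECONDITION & SPEC =====
def Spec_fix_colon_spacing (content : String) (out : String) : Prop := out = fix_colon_spacing_alt content
instance (content : String) (out : String) : Decidable (Spec_fix_colon_spacing content out) := by unfold Spec_fix_colon_spacing; infer_instance

-- ===== CLAIM (what is proved, stated in full; the proofs are below) =====
def Claim_equal_fix_colon_spacing : Prop := ∀ (content : String), Dom_fix_colon_spacing content → Spec_fix_colon_spacing content (fix_colon_spacing content)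

-- ===== LEMMAS AND PROOFS =====

def pvSplitNl : List Char → List (List Char)
  | [] => [[]]
  | c :: r => if c = '\n' then [] :: pvSplitNl r
              else (c :: (pvSplitNl r).headI) :: (pvSplitNl r).tail

lemma pvSplitNl_ne_nil (l : List Char) : pvSplitNl l ≠ [] := by
  cases l with
  | nil => simp [pvSplitNl]
  | cons c r => simp only [pvSplitNl]; split <;> simp

lemma pv_go_split (fuel : Nat) : ∀ (l cur : List Char) (acc : List (List Char)), l.length < fuel →
    PySem.Chars.splitOn.go ['\n'] fuel l cur acc
      = acc.reverse ++ ((pvSplitNl l).modifyHead (cur.reverse ++ ·)) := by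
  induction fuel with
  | zero => intro l cur acc h; omega
  | succ fuel ih =>
    intro l cur acc h
    cases l with
    | nil => simp [PySem.Chars.splitOn.go, pvSplitNl]
    | cons c r =>
      rw [PySem.Chars.splitOn.go]
      by_cases hc : c = '\n'
      · subst hc
        have hp : List.isPrefixOf ['\n'] ('\n' :: r) = true := by simp [List.isPrefixOf]
        simp only [hp, if_pos, List.length_cons, List.length_nil, List.drop_succ_cons, List.drop_zero]
        rw [ih r [] (cur.reverse :: acc) (by simpa using Nat.lt_of_succ_lt_succ h)]
        simp only [pvSplitNl, if_pos rfl, List.modifyHead_cons, List.reverse_cons, List.append_assoc]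
        simp
        cases pvSplitNl r <;> simp [List.modifyHead]
      · have hp : List.isPrefixOf ['\n'] (c :: r) = false := by simp [List.isPrefixOf]; intro hh; exact absurd hh.symm hc
        rw [if_neg (by simp [hp])]
        rw [ih r (c :: cur) acc (by simpa using Nat.lt_of_succ_lt_succ h)]
        simp only [pvSplitNl, if_neg hc]
        cases hsp : pvSplitNl r with
        | nil => exact absurd hsp (pvSplitNl_ne_nil r)
        | cons a t => simp [List.modifyHead]

lemma pv_splitOn_eq (l : List Char) : PySem.Chars.splitOn l ['\n'] = pvSplitNl l := by
  rw [PySem.Chars.splitOn, pv_go_split (l.length + 1) l [] [] (by omega)]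
  cases hsp : pvSplitNl l with
  | nil => exact absurd hsp (pvSplitNl_ne_nil l)
  | cons a t => simp [List.modifyHead]

lemma pvSplitNl_no {l : List Char} (h : '\n' ∉ l) : pvSplitNl l = [l] := by
  induction l with
  | nil => rfl
  | cons c r ih =>
    simp only [List.mem_cons, not_or] at h
    simp [pvSplitNl, if_neg (Ne.symm h.1), ih h.2]

lemma pvSplitNl_app {l : List Char} (rest : List Char) (h : '\n' ∉ l) :
    pvSplitNl (l ++ '\n' :: rest) = l :: pvSplitNl rest := by
  induction l with
  | nil => simp [pvSplitNl]
  | cons c r ih =>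
    simp only [List.mem_cons, not_or] at h
    simp [pvSplitNl, if_neg (Ne.symm h.1), ih h.2]

lemma pv_goMax_zero (fuel : Nat) (l cur : List Char) (acc : List (List Char)) :
    PySem.Chars.splitOnMax.go [':'] fuel 0 l cur acc = acc.reverse ++ [cur.reverse ++ l] := by
  cases fuel with
  | zero => rw [PySem.Chars.splitOnMax.go]; simp
  | succ fuel =>
    cases l with
    | nil => rw [PySem.Chars.splitOnMax.go]; simp; omega
    | cons c r => rw [PySem.Chars.splitOnMax.go]; simp

lemma pv_goMax_one (fuel : Nat) : ∀ (l cur : List Char) (acc : List (List Char)), l.length < fuel →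
    PySem.Chars.splitOnMax.go [':'] fuel 1 l cur acc
      = acc.reverse ++ (if ':' ∈ l then
          [cur.reverse ++ l.takeWhile (· ≠ ':'), (l.dropWhile (· ≠ ':')).tail]
        else [cur.reverse ++ l]) := by
  induction fuel with
  | zero => intro l cur acc h; omega
  | succ fuel ih =>
    intro l cur acc h
    cases l with
    | nil => rw [PySem.Chars.splitOnMax.go]; simp; omega
    | cons c r =>
      rw [PySem.Chars.splitOnMax.go]
      by_cases hc : c = ':'
      · subst hc
        have hp : List.isPrefixOf [':'] (':' :: r) = true := by simp [List.isPrefixOf]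
        simp only [hp, if_pos, if_neg (by norm_num : ¬ (1 : Nat) = 0)]
        simp only [List.length_cons, List.length_nil, List.drop_succ_cons, List.drop_zero]
        rw [pv_goMax_zero]
        simp [List.takeWhile, List.dropWhile]
      · have hp : List.isPrefixOf [':'] (c :: r) = false := by
          simp [List.isPrefixOf]; intro hh; exact absurd hh.symm hc
        rw [if_neg (by norm_num : ¬ (1 : Nat) = 0), if_neg (by simp [hp])]
        rw [ih r (c :: cur) acc (by simpa using Nat.lt_of_succ_lt_succ h)]
        simp only [List.mem_cons, List.takeWhile, List.dropWhile]
        have hcne : (c ≠ ':') = True := by simp [hc]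
        by_cases hr : ':' ∈ r
        · simp [hr, hc, List.takeWhile_cons, List.dropWhile_cons, hc]
        · simp [hr, hc]; exact fun hh => hc hh.symm

lemma pv_splitOnMax_eq (l : List Char) :
    PySem.Chars.splitOnMax l [':'] 1
      = if ':' ∈ l then [l.takeWhile (· ≠ ':'), (l.dropWhile (· ≠ ':')).tail] else [l] := by
  rw [PySem.Chars.splitOnMax, if_neg (by norm_num)]
  rw [show (1 : Int).toNat = 1 from rfl, pv_goMax_one (l.length + 1) l [] [] (by omega)]
  simp

lemma pvStep_prefix (out : List Char) (st : Nat) (buf : List Char) (ch : Char) :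
    pvStep (out, st, buf) ch
      = (out ++ (pvStep ([], st, buf) ch).1, (pvStep ([], st, buf) ch).2.1,
         (pvStep ([], st, buf) ch).2.2) := by
  simp only [pvStep]
  split_ifs <;> simp

lemma pv_prefix (l : List Char) : ∀ (out : List Char) (st : Nat) (buf : List Char),
    l.foldl pvStep (out, st, buf)
      = (out ++ (l.foldl pvStep ([], st, buf)).1, (l.foldl pvStep ([], st, buf)).2.1,
         (l.foldl pvStep ([], st, buf)).2.2) := by
  induction l with
  | nil => intro out st buf; simp
  | cons c r ih =>
    intro out st buf
    simp only [List.foldl_cons]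
    rw [pvStep_prefix out st buf c]
    rw [ih (out ++ (pvStep ([], st, buf) c).1) _ _, ih (pvStep ([], st, buf) c).1 _ _]
    simp

lemma pv_inv (l : List Char) : ∀ (out : List Char) (st : Nat) (buf : List Char),
    st ≤ 4 → (st ≠ 3 → buf = []) →
    ((l.foldl pvStep (out, st, buf)).2.1 ≤ 4 ∧
      ((l.foldl pvStep (out, st, buf)).2.1 ≠ 3 → (l.foldl pvStep (out, st, buf)).2.2 = [])) := by
  induction l with
  | nil => intro out st buf h4 h; exact ⟨h4, h⟩
  | cons c r ih =>
    intro out st buf h4 h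
    simp only [List.foldl_cons]
    rcases hs : pvStep (out, st, buf) c with ⟨o', s', b'⟩
    have hpres : s' ≤ 4 ∧ (s' ≠ 3 → b' = []) := by
      simp only [pvStep] at hs
      split_ifs at hs with h1 h2 h3 h4' h5 h6 h7 <;>
        (injection hs with e1 e2; injection e2 with e2 e3; subst e2; subst e3) <;>
        constructor <;>
        first
          | omega
          | (intro _; rfl)
          | (intro _; exact h (by omega))
          | (intro hne; exact absurd rfl hne)
          | (intro hne; omega)
          | (split <;> omega)
          | (intro hne; split at hne <;> omega)
    exact ih o' s' b' hpres.1 hpres.2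

lemma pv_L24 (l : List Char) : ∀ (out : List Char) (st : Nat) (buf : List Char),
    '\n' ∉ l → (st = 2 ∨ st = 4) →
    l.foldl pvStep (out, st, buf) = (out ++ l, st, buf) := by
  induction l with
  | nil => intro out st buf _ _; simp
  | cons c r ih =>
    intro out st buf hnl hst
    simp only [List.mem_cons, not_or] at hnl
    simp only [List.foldl_cons]
    have hstep : pvStep (out, st, buf) c = (out ++ [c], st, buf) := by
      simp only [pvStep]
      rw [if_neg (Ne.symm hnl.1), if_neg (by omega), if_pos hst]
    rw [hstep, ih (out ++ [c]) st buf hnl.2 hst]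
    simp

lemma pv_L3 (l : List Char) : ∀ (out buf : List Char), '\n' ∉ l →
    l.foldl pvStep (out, 3, buf)
      = if PySem.Chars.lstrip l = [] then (out, 3, buf ++ l)
        else (out ++ ' ' :: PySem.Chars.lstrip l, 4, []) := by
  induction l with
  | nil => intro out buf _; simp [PySem.Chars.lstrip]
  | cons c r ih =>
    intro out buf hnl
    simp only [List.mem_cons, not_or] at hnl
    simp only [List.foldl_cons]
    by_cases hsp : PySem.Chars.isspace c
    · have hstep : pvStep (out, 3, buf) c = (out, 3, buf ++ [c]) := by
        simp [pvStep, Ne.symm hnl.1, hsp]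
      rw [hstep, ih out (buf ++ [c]) hnl.2]
      simp [PySem.Chars.lstrip, List.dropWhile_cons, hsp]
    · have hstep : pvStep (out, 3, buf) c = (out ++ [' ', c], 4, []) := by
        simp [pvStep, Ne.symm hnl.1, hsp]
      rw [hstep, pv_L24 r (out ++ [' ', c]) 4 [] hnl.2 (Or.inr rfl)]
      simp [PySem.Chars.lstrip, List.dropWhile_cons, hsp]

lemma pv_L1 (l : List Char) : ∀ (out buf : List Char), '\n' ∉ l →
    l.foldl pvStep (out, 1, buf)
      = if ':' ∈ l then
          (l.dropWhile (· ≠ ':')).tail.foldl pvStep (out ++ l.takeWhile (· ≠ ':') ++ [':'], 3, buf)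
        else (out ++ l, 1, buf) := by
  induction l with
  | nil => intro out buf _; simp
  | cons c r ih =>
    intro out buf hnl
    simp only [List.mem_cons, not_or] at hnl
    simp only [List.foldl_cons]
    by_cases hc : c = ':'
    · subst hc
      have hstep : pvStep (out, 1, buf) ':' = (out ++ [':'], 3, buf) := by
        simp [pvStep]
      rw [hstep]
      simp [List.takeWhile_cons, List.dropWhile_cons]
    · have hstep : pvStep (out, 1, buf) c = (out ++ [c], 1, buf) := by
        simp [pvStep, Ne.symm hnl.1, hc]
      rw [hstep, ih (out ++ [c]) buf hnl.2]
      by_cases hr : ':' ∈ r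
      · simp [hr, hc, List.takeWhile_cons, List.dropWhile_cons]
      · have h2 : ':' ∉ c :: r := by
          simp only [List.mem_cons, not_or]
          exact ⟨fun hh => hc hh.symm, hr⟩
        simp [hr, hc, h2]

lemma pv_isIn_colon (l : List Char) : PySem.Chars.isIn [':'] l = decide (':' ∈ l) := by
  by_cases h : ':' ∈ l
  · simp [h]
    rw [PySem.Chars.isIn_iff_infix]
    exact (List.singleton_infix_iff ':' l).mpr h
  · simp [h]
    rw [PySem.Chars.isIn_eq_false_iff]
    intro hinf
    exact h (hinf.subset (by simp))

lemma pv_rstrip_cons {c : Char} (r : List Char) (h : PySem.Chars.isspace c = false) :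
    PySem.Chars.rstrip (c :: r) = c :: PySem.Chars.rstrip r := by
  simp only [PySem.Chars.rstrip, List.reverse_cons, List.dropWhile_append]
  split
  · next he =>
    have he' : List.dropWhile PySem.Chars.isspace r.reverse = [] := by
      simpa using he
    simp [List.dropWhile_cons, h, he']
  · simp

lemma pv_strip_cons_space {c : Char} (r : List Char) (h : PySem.Chars.isspace c = true) :
    PySem.Chars.strip (c :: r) = PySem.Chars.strip r := by
  simp [PySem.Chars.strip, PySem.Chars.lstrip, List.dropWhile_cons, h]

lemma pv_strip_cons_nonspace {c : Char} (r : List Char) (h : PySem.Chars.isspace c = false) :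
    PySem.Chars.strip (c :: r) = c :: PySem.Chars.rstrip r := by
  simp [PySem.Chars.strip, PySem.Chars.lstrip, List.dropWhile_cons, h, pv_rstrip_cons r h]

lemma pv_strip_nil_iff (r : List Char) :
    (PySem.Chars.strip r = []) ↔ (PySem.Chars.lstrip r = []) := by
  constructor
  · intro h
    cases hl : PySem.Chars.lstrip r with
    | nil => rfl
    | cons c w =>
      have hc : PySem.Chars.isspace c = false := by
        have h2 : List.dropWhile PySem.Chars.isspace r ≠ [] := by
          simp only [PySem.Chars.lstrip] at hl; simp [hl]
        have := List.head_dropWhile_not PySem.Chars.isspace h2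
        simp only [PySem.Chars.lstrip] at hl
        simpa [hl] using this
      rw [PySem.Chars.strip, hl, pv_rstrip_cons w hc] at h
      exact absurd h (by simp)
  · intro h; rw [PySem.Chars.strip, h]; rfl

lemma pv_fixA_closed (l : List Char) : pvFixLineA l =
    if ':' ∈ l ∧ PySem.Chars.startswith (PySem.Chars.strip l) ['#'] = false then
      l.takeWhile (· ≠ ':') ++ ':' ::
        (if PySem.Chars.lstrip ((l.dropWhile (· ≠ ':')).tail) ≠ [] then
          ' ' :: PySem.Chars.lstrip ((l.dropWhile (· ≠ ':')).tail)
        else (l.dropWhile (· ≠ ':')).tail)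
    else l := by
  unfold pvFixLineA
  rw [pv_isIn_colon, pv_splitOnMax_eq]
  by_cases hm : ':' ∈ l
  · by_cases hcm : PySem.Chars.startswith (PySem.Chars.strip l) ['#'] = false
    · simp only [hm, hcm, if_pos, decide_true, Bool.true_and, and_true, if_true]
      simp [hm, hcm, pv_strip_nil_iff]
    · have : PySem.Chars.startswith (PySem.Chars.strip l) ['#'] = true := by
        revert hcm; cases PySem.Chars.startswith (PySem.Chars.strip l) ['#'] <;> simp
      simp [hm, this, hcm]
  · simp [hm]

def pvFixB (l : List Char) : List Char :=
  let r := l.foldl pvStep ([], 0, [])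
  if r.2.1 = 3 then r.1 ++ r.2.2 else r.1

lemma pvFixB_cons_prefix (c : Char) (r : List Char) (st : Nat) (buf : List Char)
    (h : pvStep ([], 0, []) c = ([c], st, buf)) :
    pvFixB (c :: r) = c :: (if (r.foldl pvStep ([], st, buf)).2.1 = 3 then
      (r.foldl pvStep ([], st, buf)).1 ++ (r.foldl pvStep ([], st, buf)).2.2
    else (r.foldl pvStep ([], st, buf)).1) := by
  unfold pvFixB
  simp only [List.foldl_cons, h]
  rw [pv_prefix r [c] st buf]
  split <;> simp

lemma pv_line_eq (l : List Char) (hnl : '\n' ∉ l) : pvFixB l = pvFixLineA l := by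
  induction l with
  | nil => decide
  | cons c r ih =>
    simp only [List.mem_cons, not_or] at hnl
    rw [pv_fixA_closed]
    by_cases hsp : PySem.Chars.isspace c = true
    · -- leading whitespace: recurse
      have hch : c ≠ '#' := by intro e; rw [e] at hsp; exact absurd hsp (by decide)
      have hcc : c ≠ ':' := by intro e; rw [e] at hsp; exact absurd hsp (by decide)
      have hstep : pvStep ([], 0, []) c = ([c], 0, []) := by
        simp [pvStep, Ne.symm hnl.1, hch, hcc, hsp]
      rw [pvFixB_cons_prefix c r 0 [] hstep]
      have ih' := ih hnl.2
      rw [pv_fixA_closed] at ih'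
      unfold pvFixB at ih'
      by_cases hm : ':' ∈ r
      · by_cases hcm : PySem.Chars.startswith (PySem.Chars.strip r) ['#'] = false
        · rw [ih']
          simp [hm, hcm, pv_strip_cons_space r hsp, List.takeWhile_cons, List.dropWhile_cons, hcc]
        · rw [ih']
          simp [hm, hcm, pv_strip_cons_space r hsp, hcc]
      · rw [ih']
        have h2 : ':' ∉ c :: r := by
          simp only [List.mem_cons, not_or]
          exact ⟨fun hh => hcc hh.symm, hm⟩
        simp [hm, h2]
    · have hsp' : PySem.Chars.isspace c = false := by
        revert hsp; cases PySem.Chars.isspace c <;> simp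
      by_cases hch : c = '#'
      · -- comment line
        subst hch
        have hstep : pvStep ([], 0, []) '#' = (['#'], 2, []) := by simp [pvStep]
        have : pvFixB ('#' :: r) = '#' :: r := by
          unfold pvFixB
          simp only [List.foldl_cons, hstep]
          rw [pv_L24 r ['#'] 2 [] hnl.2 (Or.inl rfl)]
          simp
        rw [this]
        rw [pv_strip_cons_nonspace r hsp']
        simp [PySem.Chars.startswith, List.isPrefixOf]
      · by_cases hcc : c = ':'
        · -- colon at once (empty key)
          subst hcc
          have hstep : pvStep ([], 0, []) ':' = ([':'], 3, []) := by simp [pvStep]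
          have hfix : pvFixB (':' :: r) = (if PySem.Chars.lstrip r = [] then ':' :: r
              else ':' :: ' ' :: PySem.Chars.lstrip r) := by
            unfold pvFixB
            simp only [List.foldl_cons, hstep]
            rw [pv_L3 r [':'] [] hnl.2]
            split <;> simp
          rw [hfix, pv_strip_cons_nonspace r hsp']
          have hsw : PySem.Chars.startswith (':' :: PySem.Chars.rstrip r) ['#'] = false := by
            simp [PySem.Chars.startswith, List.isPrefixOf]
          simp only [List.mem_cons, true_or, hsw, true_and, if_pos]
          simp only [List.takeWhile_cons, List.dropWhile_cons]
          norm_num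
          split <;> simp_all
        · -- ordinary key character
          have hstep : pvStep ([], 0, []) c = ([c], 1, []) := by
            simp [pvStep, Ne.symm hnl.1, hch, hcc, hsp']
          rw [pvFixB_cons_prefix c r 1 [] hstep]
          rw [pv_L1 r [] [] hnl.2]
          by_cases hm : ':' ∈ r
          · have hv : '\n' ∉ (r.dropWhile (· ≠ ':')).tail := by
              intro hmem
              exact hnl.2 (((List.tail_sublist _).trans (List.dropWhile_sublist _)).mem hmem)
            rw [if_pos hm, pv_L3 _ _ [] hv]
            have hsw : PySem.Chars.startswith (PySem.Chars.strip (c :: r)) ['#'] = false := by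
              rw [pv_strip_cons_nonspace r hsp']
              simp [PySem.Chars.startswith, List.isPrefixOf, Ne.symm hch]
            have hmm : ':' ∈ c :: r := List.mem_cons_of_mem c hm
            simp only [hmm, hsw, true_and, if_pos]
            simp only [List.takeWhile_cons, List.dropWhile_cons]
            split <;> simp_all [hcc]
          · rw [if_neg hm]
            have h2 : ':' ∉ c :: r := by
              simp only [List.mem_cons, not_or]
              exact ⟨fun hh => hcc hh.symm, hm⟩
            simp [h2]

lemma pv_compose (l rest : List Char) (hnl : '\n' ∉ l) :
    pvFixB (l ++ '\n' :: rest) = pvFixB l ++ '\n' :: pvFixB rest := by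
  have hinv := pv_inv l [] 0 [] (by omega) (fun _ => rfl)
  rcases hfl : l.foldl pvStep ([], 0, []) with ⟨o, s, b⟩
  rw [hfl] at hinv
  simp only at hinv
  unfold pvFixB
  rw [List.foldl_append, hfl]
  simp only [List.foldl_cons]
  by_cases hs : s = 3
  · subst hs
    have hstep : pvStep (o, 3, b) '\n' = (o ++ b ++ ['\n'], 0, []) := by simp [pvStep]
    rw [hstep, pv_prefix rest (o ++ b ++ ['\n']) 0 []]
    split <;> simp
  · have hb : b = [] := hinv.2 hs
    subst hb
    have hstep : pvStep (o, s, []) '\n' = (o ++ ['\n'], 0, []) := by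
      simp [pvStep, hs]
    rw [hstep, pv_prefix rest (o ++ ['\n']) 0 []]
    simp only [hfl]
    rw [if_neg hs]
    split <;> simp

lemma pv_join_cons (x : List Char) (ys : List (List Char)) (h : ys ≠ []) :
    PySem.Chars.join ['\n'] (x :: ys) = x ++ '\n' :: PySem.Chars.join ['\n'] ys := by
  cases ys with
  | nil => exact absurd rfl h
  | cons y t => simp [PySem.Chars.join, List.intercalate, List.intersperse]

lemma pv_main (n : Nat) : ∀ cs : List Char, cs.length ≤ n →
    pvFixB cs = PySem.Chars.join ['\n'] ((pvSplitNl cs).map pvFixLineA) := by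
  induction n with
  | zero =>
    intro cs h
    have : cs = [] := by cases cs <;> simp_all
    subst this
    simp [pvSplitNl, PySem.Chars.join, pv_line_eq [] (by simp)]
    decide
  | succ n ih =>
    intro cs h
    by_cases hm : '\n' ∈ cs
    · have hd : cs.dropWhile (· ≠ '\n') ≠ [] := by
        simp only [ne_eq, List.dropWhile_eq_nil_iff]
        push_neg
        exact ⟨'\n', hm, by simp⟩
      have hhead : (cs.dropWhile (· ≠ '\n')).head hd = '\n' := by
        have := List.head_dropWhile_not (fun c => c ≠ '\n') hd
        simpa using this
      have h1 := (List.cons_head_tail hd).symm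
      rw [hhead] at h1
      have hdec : cs = cs.takeWhile (· ≠ '\n') ++ '\n' :: (cs.dropWhile (· ≠ '\n')).tail := by
        conv_lhs => rw [← List.takeWhile_append_dropWhile (p := (· ≠ '\n')) (l := cs), h1]
      have hnt : '\n' ∉ cs.takeWhile (· ≠ '\n') := by
        intro hmem
        have := List.mem_takeWhile_imp hmem
        simp at this
      have hlen : ((cs.dropWhile (· ≠ '\n')).tail).length ≤ n := by
        have h1 : (cs.takeWhile (· ≠ '\n') ++ '\n' :: (cs.dropWhile (· ≠ '\n')).tail).length = cs.length := by rw [← hdec]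
        simp only [List.length_append, List.length_cons] at h1
        omega
      rw [hdec, pv_compose _ _ hnt, pvSplitNl_app _ hnt]
      rw [List.map_cons, pv_join_cons _ _ (by simp [pvSplitNl_ne_nil])]
      rw [ih _ hlen, pv_line_eq _ hnt]
    · rw [pvSplitNl_no hm]
      simp [PySem.Chars.join, List.intercalate]
      exact pv_line_eq cs hm

lemma pv_final (content : String) : fix_colon_spacing content = fix_colon_spacing_alt content := by
  unfold fix_colon_spacing fix_colon_spacing_alt
  simp only []
  rw [PySem.List.foldl_append_singleton_eq_map, pv_splitOn_eq]
  have := pv_main content.toList.length content.toList (le_refl _)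
  unfold pvFixB at this
  simp only [List.nil_append]
  rw [← this]

-- ===== VERDICT (by name: the statement is the Claim_ definition above) =====
theorem fix_colon_spacing_spec : Claim_equal_fix_colon_spacing := by
  intro content _
  unfold Spec_fix_colon_spacing
  exact pv_final content
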